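-- pv_equiv track=rewrite | github.com/xiaowen581/qq_sim | code/nlp_utils/dataset.py | get_same_meaning_sentence
-- ===== SOURCE A (Python) =====
-- def get_same_meaning_sentence(data):
--     def get_sentence_by_id(data_pair_list, sentence_id):
--         return data_pair_list[int(sentence_id / 2)][int(sentence_id % 2)]
--
--     def find_root_id(sent_label_list: list, index: int):
--         if sent_label_list[index] == index:
--             return index
--
--         sent_label_list[index] = find_root_id(sent_label_list, sent_label_list[index])
--         return sent_label_list[index]
--
--     # data = prepare_qqsim_data(train_file_v2)
--     data_label_1 = [(sent_a, sent_b) for (sent_a, sent_b, label) in zip(*data) if label == 1]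
--
--     sent_label = [i for i in range(len(data_label_1) * 2)]
--     sent_hash = {}
--     for index, (sent_a, sent_b) in enumerate(data_label_1):
--         index_a = index * 2
--         index_b = index * 2 + 1
--
--         index_root_a = index_a
--         if sent_a in sent_hash.keys():
--             index_root_a = find_root_id(sent_label, sent_hash[sent_a])
--         else:
--             sent_hash[sent_a] = index_a
--
--         index_root_b = index_b
--         if sent_b in sent_hash.keys():
--             index_root_b = find_root_id(sent_label, sent_hash[sent_b])
--         else:
--             sent_hash[sent_b] = index_b
--
--         sent_label[index_root_b] = index_root_a
--         # 8 7422
--     # 47268 47269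
--     for index in range(len(sent_label)):
--         sent_label[index] = find_root_id(sent_label, sent_label[index])
--
--     result = {}
--     for index in range(len(sent_label)):
--         if sent_label[index] in result.keys():
--             result[sent_label[index]].append(index)
--         else:
--             result[sent_label[index]] = [index]
--
--     same_sentences_list = []
--     for key, value in result.items():
--         # if len(value) > 2:
--         same_sentence = [get_sentence_by_id(data_label_1, index) for index in value]
--         same_sentences_list.append(same_sentence)
--
--     return same_sentences_list
-- ===== SOURCE B (Python) =====
-- def get_same_meaning_sentence(data):
--     pairs = [(sent_a, sent_b) for (sent_a, sent_b, label) in zip(*data) if label == 1]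
--     n = 2 * len(pairs)
--     labels = list(range(n))
--     sent_hash = {}
--     for i, (a, b) in enumerate(pairs):
--         if a in sent_hash:
--             ra = labels[sent_hash[a]]
--         else:
--             sent_hash[a] = 2 * i
--             ra = 2 * i
--         if b in sent_hash:
--             rb = labels[sent_hash[b]]
--         else:
--             sent_hash[b] = 2 * i + 1
--             rb = 2 * i + 1
--         if ra != rb:
--             labels = [ra if x == rb else x for x in labels]
--     groups = {}
--     for i, lab in enumerate(labels):
--         groups.setdefault(lab, []).append(i)
--     return [[pairs[j // 2][j % 2] for j in g] for g in groups.values()]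
-- ===== Notes on version B (the rewrite author's own statement) =====
-- stated objective: alternative
-- what changed: Replaced A's recursive path-compressing union-find (parent-pointer forest, find_root_id, final compression pass, then grouping) by a flat representative array that is rewritten wholesale at each merge, so roots are read off directly with no recursion and no second pass.
import Mathlib
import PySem

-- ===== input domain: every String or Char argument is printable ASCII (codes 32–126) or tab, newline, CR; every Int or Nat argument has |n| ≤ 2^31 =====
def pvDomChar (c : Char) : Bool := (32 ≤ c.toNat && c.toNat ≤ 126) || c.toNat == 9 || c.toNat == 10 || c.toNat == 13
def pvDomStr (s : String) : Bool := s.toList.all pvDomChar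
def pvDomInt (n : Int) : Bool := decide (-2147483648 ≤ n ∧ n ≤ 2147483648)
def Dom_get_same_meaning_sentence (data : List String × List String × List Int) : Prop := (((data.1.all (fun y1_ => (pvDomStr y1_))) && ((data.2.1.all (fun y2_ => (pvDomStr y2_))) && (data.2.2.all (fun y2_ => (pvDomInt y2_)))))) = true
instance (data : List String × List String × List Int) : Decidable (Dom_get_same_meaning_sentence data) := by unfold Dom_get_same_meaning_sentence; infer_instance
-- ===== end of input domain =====

-- B replaces A's recursive path-compressing union-find (parent forest, find_root_id,
-- final compression pass) by a flat representative array rewritten wholesale at each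
-- merge, so no recursion and no second pass are needed (objective: alternative).

-- Shared data preparation: [(a, b) for (a, b, l) in zip(*data) if l == 1]
-- (zip of three lists truncates to the shortest, exactly like Python's zip(*data))

def pvPairs (data : List String × List String × List Int) : List (String × String) :=
  (data.1.zip (data.2.1.zip data.2.2)).filterMap
    (fun x => if x.2.2 = 1 then some (x.1, x.2.1) else none)


-- Shared sentence lookup: data_pair_list[int(id/2)][int(id%2)].  Every id either
-- program produces is a Nat < 2*pairs.length, so Nat division/mod and getD's default
-- are exact here (Python's int(id/2) = id//2 for nonnegative id, and no IndexError).

def pvSent (pairs : List (String × String)) (id : Nat) : String :=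
  let p := pairs.getD (id / 2) ("", "")
  if id % 2 = 0 then p.1 else p.2


-- ===== PORT A =====
-- find_root_id with path compression; fuel = list length, which always suffices
-- because the parent pointers form a forest on sl.length nodes (findPure_fuel below)


def pvFindRoot (fuel : Nat) (sl : List Nat) (i : Nat) : List Nat × Nat :=
  match fuel with
  | 0 => (sl, i)
  | f+1 =>
    if sl.getD i 0 = i then (sl, i)
    else
      let q := pvFindRoot f sl (sl.getD i 0)
      (q.1.set i q.2, q.2)


-- A's repeated block: hash lookup (find root of stored index) or insert of idx
def pvLookupA (sl : List Nat) (h : PySem.Dict String Nat) (idx : Nat) (s : String) :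
    List Nat × Nat × PySem.Dict String Nat :=
  match h.get? s with
  | some v => let q := pvFindRoot sl.length sl v; (q.1, q.2, h)
  | none => (sl, idx, h.insert s idx)


-- body of A's 'for index, (sent_a, sent_b) in enumerate(data_label_1)' loop
def pvStepA (sl : List Nat) (h : PySem.Dict String Nat) (k : Nat) (a b : String) :
    List Nat × PySem.Dict String Nat :=
  let ra := pvLookupA sl h (2*k) a
  let rb := pvLookupA ra.1 ra.2.2 (2*k+1) b
  (rb.1.set rb.2.1 ra.2.1, rb.2.2)


-- the enumerate loop, Python's nonnegative index threaded explicitly as a Nat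
def pvLoopA (ps : List (String × String)) (k : Nat) (sl : List Nat)
    (h : PySem.Dict String Nat) : List Nat × PySem.Dict String Nat :=
  match ps with
  | [] => (sl, h)
  | p :: rest =>
    let st := pvStepA sl h k p.1 p.2
    pvLoopA rest (k+1) st.1 st.2


-- 'for index in range(len(sent_label)): sent_label[index] = find_root_id(...)'
def pvCompress (idxs : List Nat) (sl : List Nat) : List Nat :=
  idxs.foldl (fun s i =>
    let q := pvFindRoot s.length s (s.getD i 0)
    q.1.set i q.2) sl


-- 'if sent_label[index] in result.keys(): ...append(index) else: ... = [index]'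
def pvGroupA (sl : List Nat) : PySem.Dict Nat (List Nat) :=
  (List.range sl.length).foldl (fun r i =>
    let k := sl.getD i 0
    match r.get? k with
    | some v => r.insert k (v ++ [i])
    | none => r.insert k [i]) PySem.Dict.empty


def get_same_meaning_sentence (data : List String × List String × List Int) :
    List (List String) :=
  let pairs := pvPairs data
  let init : List Nat := List.range (2 * pairs.length)
  let st := pvLoopA pairs 0 init PySem.Dict.empty
  let slF := pvCompress (List.range st.1.length) st.1
  (pvGroupA slF).items.map (fun kv => kv.2.map (pvSent pairs))


-- ===== PORT B =====
-- B's repeated block: the representative comes straight off the flat label array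


def pvLookupB (lb : List Nat) (h : PySem.Dict String Nat) (idx : Nat) (s : String) :
    Nat × PySem.Dict String Nat :=
  match h.get? s with
  | some v => (lb.getD v 0, h)
  | none => (idx, h.insert s idx)


-- body of B's loop: wholesale relabel of rb's class to ra on each real merge
def pvStepB (lb : List Nat) (h : PySem.Dict String Nat) (k : Nat) (a b : String) :
    List Nat × PySem.Dict String Nat :=
  let ra := pvLookupB lb h (2*k) a
  let rb := pvLookupB lb ra.2 (2*k+1) b
  (if ra.1 ≠ rb.1 then lb.map (fun x => if x = rb.1 then ra.1 else x) else lb, rb.2)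


def pvLoopB (ps : List (String × String)) (k : Nat) (lb : List Nat)
    (h : PySem.Dict String Nat) : List Nat × PySem.Dict String Nat :=
  match ps with
  | [] => (lb, h)
  | p :: rest =>
    let st := pvStepB lb h k p.1 p.2
    pvLoopB rest (k+1) st.1 st.2


-- 'groups.setdefault(lab, []).append(i)' over enumerate(labels)
def pvBucketsB (ls : List Nat) (i : Nat) (g : PySem.Dict Nat (List Nat)) :
    PySem.Dict Nat (List Nat) :=
  match ls with
  | [] => g
  | l :: rest => pvBucketsB rest (i+1) (g.insert l (g.getD l [] ++ [i]))


def get_same_meaning_sentence_alt (data : List String × List String × List Int) :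
    List (List String) :=
  let pairs := pvPairs data
  let st := pvLoopB pairs 0 (List.range (2 * pairs.length)) PySem.Dict.empty
  (pvBucketsB st.1 0 PySem.Dict.empty).values.map (fun v => v.map (pvSent pairs))


-- ===== PRECONDITION & SPEC =====
def Spec_get_same_meaning_sentence (data : List String × List String × List Int) (out : List (List String)) : Prop := out = get_same_meaning_sentence_alt data
instance (data : List String × List String × List Int) (out : List (List String)) : Decidable (Spec_get_same_meaning_sentence data out) := by unfold Spec_get_same_meaning_sentence; infer_instance

-- ===== CLAIM (what is proved, stated in full; the proofs are below) =====
def Claim_equal_get_same_meaning_sentence : Prop := ∀ (data : List String × List String × List Int), Dom_get_same_meaning_sentence data → Spec_get_same_meaning_sentence data (get_same_meaning_sentence data)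

-- ===== LEMMAS AND PROOFS =====

-- pure (non-mutating) root finder over the parent list; used only in proofs


def findPure (f : Nat) (sl : List Nat) (i : Nat) : Option Nat :=
  match f with
  | 0 => none
  | f+1 => if sl.getD i 0 = i then some i else findPure f sl (sl.getD i 0)


theorem findPure_zero (sl : List Nat) (i : Nat) : findPure 0 sl i = none := rfl


theorem findPure_succ (f : Nat) (sl : List Nat) (i : Nat) :
    findPure (f+1) sl i = if sl.getD i 0 = i then some i else findPure f sl (sl.getD i 0) := rfl


theorem findPure_mono {f g : Nat} {sl : List Nat} {i r : Nat}
    (h : findPure f sl i = some r) (hfg : f ≤ g) : findPure g sl i = some r := by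
  induction f generalizing g i with
  | zero => rw [findPure_zero] at h; cases h
  | succ f ih =>
    obtain ⟨g', rfl⟩ : ∃ g', g = g' + 1 := ⟨g - 1, by omega⟩
    rw [findPure_succ] at h
    rw [findPure_succ]
    split at h
    · rw [if_pos (by assumption)]; exact h
    · rw [if_neg (by assumption)]; exact ih h (by omega)


theorem findPure_det {f g : Nat} {sl : List Nat} {i r r' : Nat}
    (h : findPure f sl i = some r) (h' : findPure g sl i = some r') : r = r' := by
  have h1 := findPure_mono h (Nat.le_max_left f g)
  have h2 := findPure_mono h' (Nat.le_max_right f g)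
  rw [h1] at h2; exact Option.some_inj.mp h2


theorem findPure_root_fix {f : Nat} {sl : List Nat} {i r : Nat}
    (h : findPure f sl i = some r) : sl.getD r 0 = r := by
  induction f generalizing i with
  | zero => rw [findPure_zero] at h; cases h
  | succ f ih =>
    rw [findPure_succ] at h
    split at h
    · obtain rfl := Option.some_inj.mp h; assumption
    · exact ih h


theorem findPure_fix {f : Nat} {sl : List Nat} {i : Nat}
    (h : sl.getD i 0 = i) (hf : 1 ≤ f) : findPure f sl i = some i := by
  obtain ⟨g, rfl⟩ : ∃ g, f = g + 1 := ⟨f - 1, by omega⟩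
  rw [findPure_succ, if_pos h]


theorem findPure_closed {m f : Nat} {sl : List Nat} {i r : Nat}
    (hcl : ∀ x, x < m → sl.getD x 0 < m) (hi : i < m)
    (h : findPure f sl i = some r) : r < m := by
  induction f generalizing i with
  | zero => rw [findPure_zero] at h; cases h
  | succ f ih =>
    rw [findPure_succ] at h
    split at h
    · obtain rfl := Option.some_inj.mp h; exact hi
    · exact ih (hcl i hi) h


theorem findPure_exists_iter {f : Nat} {sl : List Nat} {i r : Nat}
    (h : findPure f sl i = some r) :
    ∃ k, k < f ∧ (fun j => sl.getD j 0)^[k] i = r ∧ sl.getD r 0 = r := by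
  induction f generalizing i with
  | zero => rw [findPure_zero] at h; cases h
  | succ f ih =>
    rw [findPure_succ] at h
    split at h
    · obtain rfl := Option.some_inj.mp h
      exact ⟨0, by omega, rfl, by assumption⟩
    · obtain ⟨k, hk, hit, hfix⟩ := ih h
      exact ⟨k+1, by omega, by simpa [Function.iterate_succ_apply] using hit, hfix⟩


theorem findPure_of_iter {sl : List Nat} {i r : Nat} (k : Nat)
    (hit : (fun j => sl.getD j 0)^[k] i = r) (hfix : sl.getD r 0 = r) :
    findPure (k+1) sl i = some i ∨ findPure (k+1) sl i = some r := by
  induction k generalizing i with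
  | zero => right; subst hit; exact findPure_fix hfix (by omega)
  | succ k ih =>
    by_cases hfi : sl.getD i 0 = i
    · left; exact findPure_fix hfi (by omega)
    · rw [Function.iterate_succ_apply] at hit
      have hstep : findPure (k+1+1) sl i = findPure (k+1) sl (sl.getD i 0) := by
        rw [findPure_succ, if_neg hfi]
      rcases ih hit with h | h
      · right
        rw [hstep, h]
        have hfx : sl.getD (sl.getD i 0) 0 = sl.getD i 0 := findPure_root_fix h
        have h2 : (fun j => sl.getD j 0)^[k] (sl.getD i 0) = sl.getD i 0 :=
          Function.iterate_fixed hfx k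
        rw [h2] at hit; rw [hit]
      · right; rw [hstep, h]


theorem findPure_fuel {f : Nat} {sl : List Nat} {i r : Nat}
    (hi : i < sl.length) (hcl : ∀ j, j < sl.length → sl.getD j 0 < sl.length)
    (h : findPure f sl i = some r) : findPure sl.length sl i = some r := by
  classical
  set n := sl.length with hn
  set F : Nat → Nat := fun j => sl.getD j 0 with hF
  obtain ⟨k, hkf, hit, hfix⟩ := findPure_exists_iter h
  have hP : ∃ m, F (F^[m] i) = F^[m] i := ⟨k, by rw [hit]; exact hfix⟩
  set k0 := Nat.find hP with hk0
  have hk0spec : F (F^[k0] i) = F^[k0] i := Nat.find_spec hP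
  have hk0min : ∀ m, m < k0 → F (F^[m] i) ≠ F^[m] i := fun m hm => Nat.find_min hP hm
  have hconst : ∀ t, F^[k0 + t] i = F^[k0] i := by
    intro t
    rw [Nat.add_comm, Function.iterate_add_apply]
    exact Function.iterate_fixed hk0spec t
  have hk0lek : k0 ≤ k := by
    by_contra hlt
    exact hk0min k (by omega) (by rw [hit]; exact hfix)
  have hr : F^[k0] i = r := by
    have h3 := hconst (k - k0)
    rw [Nat.add_sub_cancel' hk0lek] at h3
    rw [hit] at h3; exact h3.symm
  have hinj : ∀ a b, a < b → b ≤ k0 → F^[a] i ≠ F^[b] i := by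
    intro a b hab hbk heq
    have hper : ∀ t, F^[a + t] i = F^[b + t] i := by
      intro t
      rw [Nat.add_comm a t, Nat.add_comm b t, Function.iterate_add_apply,
        Function.iterate_add_apply, heq]
    have h4 := hper (k0 - b)
    have h2 : F^[b + (k0 - b)] i = F^[k0] i := by rw [Nat.add_sub_cancel' hbk]
    rw [h2] at h4
    have h5 : F (F^[a + (k0 - b)] i) = F^[a + (k0 - b)] i := by
      rw [h4]; exact hk0spec
    exact hk0min (a + (k0 - b)) (by omega) h5
  have hmem : ∀ t, F^[t] i < n := by
    intro t
    induction t with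
    | zero => simpa using hi
    | succ t iht =>
      rw [Function.iterate_succ_apply']
      exact hcl _ iht
  have hcard : k0 + 1 ≤ n := by
    have hI : Function.Injective (fun a : Fin (k0+1) => (⟨F^[a.1] i, hmem a.1⟩ : Fin n)) := by
      intro a b hab
      simp only [Fin.mk.injEq] at hab
      rcases Nat.lt_trichotomy a.1 b.1 with hlt | heq | hgt
      · exact absurd hab (hinj a.1 b.1 hlt (by omega))
      · exact Fin.ext heq
      · exact absurd hab.symm (hinj b.1 a.1 hgt (by omega))
    simpa using Fintype.card_le_of_injective _ hI
  have hfixr : sl.getD r 0 = r := hfix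
  rcases findPure_of_iter k0 hr hfixr with hres | hres
  · have h6 := findPure_det hres h
    rw [← h6] at h ⊢
    exact findPure_mono hres (by omega)
  · exact findPure_mono hres (by omega)


theorem getD_set_self {sl : List Nat} {i v : Nat} (hi : i < sl.length) :
    (sl.set i v).getD i 0 = v := by
  rw [List.getD_eq_getElem _ _ (by simpa using hi)]
  simp


theorem getD_set_ne {sl : List Nat} {i j v : Nat} (hij : j ≠ i) :
    (sl.set i v).getD j 0 = sl.getD j 0 := by
  simp [List.getD_eq_getElem?_getD, List.getElem?_set_ne (by omega : i ≠ j)]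


theorem findPure_self_of_fix {g : Nat} {sl : List Nat} {j r : Nat}
    (hfix : sl.getD j 0 = j) (h : findPure g sl j = some r) : r = j := by
  cases g with
  | zero => rw [findPure_zero] at h; cases h
  | succ g => rw [findPure_succ, if_pos hfix] at h; exact (Option.some_inj.mp h).symm


theorem findPure_set_root {g : Nat} {sl : List Nat} {i r : Nat}
    (hi : i < sl.length) (hr : findPure g sl i = some r) :
    ∀ f j ρ, findPure f sl j = some ρ → findPure f (sl.set i r) j = some ρ := by
  intro f
  induction f with
  | zero => intro j ρ h; rw [findPure_zero] at h; cases h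
  | succ f ih =>
    intro j ρ h
    rw [findPure_succ] at h
    by_cases hji : j = i
    · subst hji
      split at h
      · rename_i hfixj
        obtain rfl := Option.some_inj.mp h
        have hrj : r = j := findPure_self_of_fix hfixj hr
        subst hrj
        exact findPure_fix (getD_set_self hi) (by omega)
      · rename_i hne
        have hρ : findPure (f+1) sl j = some ρ := by rw [findPure_succ, if_neg hne]; exact h
        have hrρ : r = ρ := findPure_det hr hρ
        subst hrρ
        by_cases hri : r = j
        · exact absurd (hri ▸ findPure_root_fix hr) hne
        · have hf1 : 1 ≤ f := by
            cases f with
            | zero => rw [findPure_zero] at h; cases h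
            | succ f => omega
          have hfixr : sl.getD r 0 = r := findPure_root_fix hr
          have hfix' : (sl.set j r).getD r 0 = r := by rw [getD_set_ne hri]; exact hfixr
          rw [findPure_succ, getD_set_self hi, if_neg hri]
          exact findPure_fix hfix' hf1
    · rw [findPure_succ, getD_set_ne hji]
      split at h
      · rw [if_pos (by assumption)]; exact h
      · rw [if_neg (by assumption)]; exact ih _ _ h


theorem findPure_set_union {sl : List Nat} {ra rb : Nat}
    (hra : sl.getD ra 0 = ra) (hrb : sl.getD rb 0 = rb) (hrbn : rb < sl.length) :
    ∀ f j ρ, findPure f sl j = some ρ →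
      findPure (f+1) (sl.set rb ra) j = some (if ρ = rb then ra else ρ) := by
  intro f
  induction f with
  | zero => intro j ρ h; rw [findPure_zero] at h; cases h
  | succ f ih =>
    intro j ρ h
    rw [findPure_succ] at h
    split at h
    · rename_i hfix
      obtain rfl := Option.some_inj.mp h
      by_cases hjrb : j = rb
      · rw [if_pos hjrb, hjrb]
        have h1 : (sl.set rb ra).getD rb 0 = ra := getD_set_self hrbn
        rw [findPure_succ, h1]
        by_cases hab : ra = rb
        · rw [if_pos hab, hab]
        · rw [if_neg hab]
          have h2 : (sl.set rb ra).getD ra 0 = ra := by rw [getD_set_ne hab]; exact hra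
          exact findPure_fix h2 (by omega)
      · rw [if_neg hjrb]
        have hfx : (sl.set rb ra).getD j 0 = j := by rw [getD_set_ne hjrb]; exact hfix
        exact findPure_fix hfx (by omega)
    · rename_i hne
      have hjrb : j ≠ rb := by intro hh; subst hh; exact hne hrb
      have hrec := ih _ _ h
      rw [findPure_succ, getD_set_ne hjrb, if_neg hne]
      exact hrec


theorem pvFindRoot_succ (f : Nat) (sl : List Nat) (i : Nat) :
    pvFindRoot (f+1) sl i = if sl.getD i 0 = i then (sl, i)
      else ((pvFindRoot f sl (sl.getD i 0)).1.set i (pvFindRoot f sl (sl.getD i 0)).2,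
            (pvFindRoot f sl (sl.getD i 0)).2) := rfl


theorem pvFindRoot_spec {F : Nat} {sl : List Nat} {i r : Nat}
    (hi : i < sl.length) (hcl : ∀ j, j < sl.length → sl.getD j 0 < sl.length)
    (h : findPure F sl i = some r) :
    (pvFindRoot F sl i).2 = r ∧
    (pvFindRoot F sl i).1.length = sl.length ∧
    (∀ f j ρ, findPure f sl j = some ρ → findPure f (pvFindRoot F sl i).1 j = some ρ) ∧
    (∀ j, (pvFindRoot F sl i).1.getD j 0 = sl.getD j 0 ∨
          ∃ g, findPure g sl j = some ((pvFindRoot F sl i).1.getD j 0)) := by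
  induction F generalizing i r with
  | zero => rw [findPure_zero] at h; cases h
  | succ F ih =>
    rw [findPure_succ] at h
    by_cases hfix : sl.getD i 0 = i
    · rw [if_pos hfix] at h
      rw [pvFindRoot_succ, if_pos hfix]
      exact ⟨Option.some_inj.mp h, rfl, fun f j ρ hh => hh, fun j => Or.inl rfl⟩
    · rw [if_neg hfix] at h
      have hp : sl.getD i 0 < sl.length := hcl i hi
      obtain ⟨hr2, hlen2, hpres2, hwr2⟩ := ih hp h
      rw [pvFindRoot_succ, if_neg hfix]
      have hFull : findPure (F+1) sl i = some r := by
        rw [findPure_succ, if_neg hfix]; exact h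
      have hi2 : i < (pvFindRoot F sl (sl.getD i 0)).1.length := by rw [hlen2]; exact hi
      have hpre_i : findPure (F+1) (pvFindRoot F sl (sl.getD i 0)).1 i =
          some (pvFindRoot F sl (sl.getD i 0)).2 := by
        rw [hr2]; exact hpres2 _ _ _ hFull
      refine ⟨hr2, ?_, ?_, ?_⟩
      · rw [List.length_set]; exact hlen2
      · intro f j ρ hh
        exact findPure_set_root hi2 hpre_i f j ρ (hpres2 _ _ _ hh)
      · intro j
        by_cases hji : j = i
        · subst hji
          right
          rw [getD_set_self hi2, hr2]
          exact ⟨F+1, hFull⟩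
        · rw [getD_set_ne hji]
          exact hwr2 j


def pvPsl (n k : Nat) (sl : List Nat) : Prop :=
  ∀ j, j < n → (j < 2*k → sl.getD j 0 < 2*k) ∧ (2*k ≤ j → sl.getD j 0 = j)


theorem pvPsl_cl {n k : Nat} {sl : List Nat} (hkn : 2*k ≤ n) (hsl : sl.length = n)
    (hP : pvPsl n k sl) : ∀ j, j < sl.length → sl.getD j 0 < sl.length := by
  intro j hj
  rw [hsl] at hj ⊢
  rcases Nat.lt_or_ge j (2*k) with hlt | hge
  · have := (hP j hj).1 hlt; omega
  · rw [(hP j hj).2 hge]; exact hj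


theorem pvLookup_sim {n k : Nat} {sl lb : List Nat} {h : PySem.Dict String Nat}
    {idx : Nat} (s : String)
    (hkn : 2*k ≤ n) (hidx1 : 2*k ≤ idx) (hidx2 : idx < 2*k+2) (hidxn : idx < n)
    (hsl : sl.length = n) (hlbl : lb.length = n)
    (hPsl : pvPsl n k sl) (hPlb : pvPsl n k lb)
    (hfuel : ∀ j, j < n → findPure n sl j = some (lb.getD j 0))
    (hhb : ∀ s' v, h.get? s' = some v → v ≤ 2*k) :
    (pvLookupA sl h idx s).2.1 = (pvLookupB lb h idx s).1 ∧
    (pvLookupA sl h idx s).2.2 = (pvLookupB lb h idx s).2 ∧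
    (pvLookupA sl h idx s).1.length = n ∧
    pvPsl n k (pvLookupA sl h idx s).1 ∧
    (∀ j, j < n → findPure n (pvLookupA sl h idx s).1 j = some (lb.getD j 0)) ∧
    (∀ x, sl.getD x 0 = x → (pvLookupA sl h idx s).1.getD x 0 = x) ∧
    (pvLookupA sl h idx s).1.getD ((pvLookupB lb h idx s).1) 0 = (pvLookupB lb h idx s).1 ∧
    (pvLookupB lb h idx s).1 ≤ idx ∧
    (∀ s' v, (pvLookupA sl h idx s).2.2.get? s' = some v → v ≤ idx) := by
  have hcl : ∀ j, j < sl.length → sl.getD j 0 < sl.length := pvPsl_cl hkn hsl hPsl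
  cases hga : h.get? s with
  | none =>
    have hA : pvLookupA sl h idx s = (sl, idx, h.insert s idx) := by
      simp only [pvLookupA, hga]
    have hB : pvLookupB lb h idx s = (idx, h.insert s idx) := by
      simp only [pvLookupB, hga]
    rw [hA, hB]
    have hfx : sl.getD idx 0 = idx := (hPsl idx hidxn).2 hidx1
    refine ⟨rfl, rfl, hsl, hPsl, hfuel, fun x hx => hx, hfx, le_refl _, ?_⟩
    intro s' v hv
    by_cases hss : s' = s
    · subst hss
      rw [PySem.Dict.get?_insert_self] at hv
      injection hv with hv
      omega
    · rw [PySem.Dict.get?_insert_of_ne _ _ hss] at hv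
      exact le_trans (hhb s' v hv) (by omega)
  | some v =>
    have hvk : v ≤ 2*k := hhb s v hga
    have hvn : v < n := by omega
    have hv' : v < sl.length := by omega
    have hfv : findPure sl.length sl v = some (lb.getD v 0) := by
      rw [hsl]; exact hfuel v hvn
    obtain ⟨hr2, hlen2, hpres2, hwr2⟩ := pvFindRoot_spec hv' hcl hfv
    have hA : pvLookupA sl h idx s =
        ((pvFindRoot sl.length sl v).1, (pvFindRoot sl.length sl v).2, h) := by
      simp only [pvLookupA, hga]
    have hB : pvLookupB lb h idx s = (lb.getD v 0, h) := by
      simp only [pvLookupB, hga]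
    rw [hA, hB]
    have hlen2' : (pvFindRoot sl.length sl v).1.length = n := by omega
    have hrfix : sl.getD (lb.getD v 0) 0 = lb.getD v 0 := findPure_root_fix (hfuel v hvn)
    have htrans : ∀ x, sl.getD x 0 = x → (pvFindRoot sl.length sl v).1.getD x 0 = x := by
      intro x hx
      rcases hwr2 x with heq | ⟨g, hg⟩
      · rw [heq]; exact hx
      · rw [findPure_self_of_fix hx hg]
    have hPsl' : pvPsl n k (pvFindRoot sl.length sl v).1 := by
      intro j hj
      have hcl2k : ∀ x, x < 2*k → sl.getD x 0 < 2*k := by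
        intro x hx; exact (hPsl x (by omega)).1 hx
      constructor
      · intro hjk
        rcases hwr2 j with heq | ⟨g, hg⟩
        · rw [heq]; exact (hPsl j hj).1 hjk
        · have := findPure_closed hcl2k hjk hg
          -- the written value is some root reached from j
          exact (findPure_det hg hg) ▸ this
      · intro hjk
        exact htrans j ((hPsl j hj).2 hjk)
    have hfuel' : ∀ j, j < n → findPure n (pvFindRoot sl.length sl v).1 j = some (lb.getD j 0) := by
      intro j hj
      exact hpres2 _ _ _ (hfuel j hj)
    have hrb : lb.getD v 0 ≤ idx := by
      rcases Nat.lt_or_ge v (2*k) with hlt | hge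
      · have := (hPlb v hvn).1 hlt; omega
      · have := (hPlb v hvn).2 hge; omega
    refine ⟨hr2, rfl, hlen2', hPsl', hfuel', htrans, ?_, hrb, ?_⟩
    · exact htrans _ hrfix
    · intro s' w hw
      exact le_trans (hhb s' w hw) (by omega)


def pvInv (n k : Nat) (sl lb : List Nat) : Prop :=
  sl.length = n ∧ lb.length = n ∧ pvPsl n k sl ∧ pvPsl n k lb ∧
  (∀ j, j < n → findPure n sl j = some (lb.getD j 0))


def pvHInv (k : Nat) (h : PySem.Dict String Nat) : Prop :=
  ∀ s v, h.get? s = some v → v ≤ 2*k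


theorem getD_map_ite {lb : List Nat} {ra rb j : Nat} (hj : j < lb.length) :
    (lb.map (fun x => if x = rb then ra else x)).getD j 0 =
      if lb.getD j 0 = rb then ra else lb.getD j 0 := by
  rw [List.getD_eq_getElem _ _ (by simpa using hj), List.getD_eq_getElem _ _ hj]
  simp


theorem pvStep_sim {n k : Nat} {sl lb : List Nat} {h : PySem.Dict String Nat}
    (a b : String) (hkn : 2*k+2 ≤ n) (hinv : pvInv n k sl lb) (hh : pvHInv k h) :
    (pvStepA sl h k a b).2 = (pvStepB lb h k a b).2 ∧
    pvInv n (k+1) (pvStepA sl h k a b).1 (pvStepB lb h k a b).1 ∧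
    pvHInv (k+1) (pvStepA sl h k a b).2 := by
  obtain ⟨hsl, hlbl, hPsl, hPlb, hfuel⟩ := hinv
  obtain ⟨ha_r, ha_h, ha_len, ha_Psl, ha_fuel, ha_tr, ha_fix, ha_le, ha_hb⟩ :=
    pvLookup_sim (h := h) (idx := 2*k) (sl := sl) (lb := lb) a (by omega) (by omega)
      (by omega) (by omega) hsl hlbl hPsl hPlb hfuel (fun s' v hv => hh s' v hv)
  obtain ⟨hb_r, hb_h, hb_len, hb_Psl, hb_fuel, hb_tr, hb_fix, hb_le, hb_hb⟩ :=
    pvLookup_sim (h := (pvLookupA sl h (2*k) a).2.2) (idx := 2*k+1)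
      (sl := (pvLookupA sl h (2*k) a).1) (lb := lb) b (by omega) (by omega) (by omega)
      (by omega) ha_len hlbl ha_Psl hPlb ha_fuel
      (fun s' v hv => le_trans (ha_hb s' v hv) (by omega))
  have hstepA : pvStepA sl h k a b =
      ((pvLookupA (pvLookupA sl h (2*k) a).1 (pvLookupA sl h (2*k) a).2.2 (2*k+1) b).1.set
        (pvLookupA (pvLookupA sl h (2*k) a).1 (pvLookupA sl h (2*k) a).2.2 (2*k+1) b).2.1
        (pvLookupA sl h (2*k) a).2.1,
       (pvLookupA (pvLookupA sl h (2*k) a).1 (pvLookupA sl h (2*k) a).2.2 (2*k+1) b).2.2) := rfl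
  have hstepB : pvStepB lb h k a b =
      (if (pvLookupB lb h (2*k) a).1 ≠
          (pvLookupB lb (pvLookupA sl h (2*k) a).2.2 (2*k+1) b).1 then
        lb.map (fun x =>
          if x = (pvLookupB lb (pvLookupA sl h (2*k) a).2.2 (2*k+1) b).1 then
            (pvLookupB lb h (2*k) a).1 else x)
       else lb,
       (pvLookupB lb (pvLookupA sl h (2*k) a).2.2 (2*k+1) b).2) := by
    rw [ha_h]; rfl
  -- abbreviations
  set ra := (pvLookupB lb h (2*k) a).1 with hra_def
  set rb := (pvLookupB lb (pvLookupA sl h (2*k) a).2.2 (2*k+1) b).1 with hrb_def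
  set sl2 := (pvLookupA (pvLookupA sl h (2*k) a).1 (pvLookupA sl h (2*k) a).2.2 (2*k+1) b).1
    with hsl2_def
  rw [hstepA, hstepB, ha_r, hb_r]
  have hfix_ra : sl2.getD ra 0 = ra := by
    have := hb_tr ra (by rw [← ha_r] at ha_fix ⊢; exact ha_fix)
    exact this
  have hfix_rb : sl2.getD rb 0 = rb := hb_fix
  have hrb_lt : rb < n := by omega
  have hrb_len : rb < sl2.length := by omega
  have hslU_len : (sl2.set rb ra).length = n := by rw [List.length_set]; exact hb_len
  -- pointwise description of the updated label array
  have hlbU : ∀ j, j < n →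
      (if ra ≠ rb then lb.map (fun x => if x = rb then ra else x) else lb).getD j 0 =
        if lb.getD j 0 = rb then ra else lb.getD j 0 := by
    intro j hj
    by_cases hne : ra ≠ rb
    · rw [if_pos hne]
      exact getD_map_ite (by omega)
    · rw [if_neg hne]
      rw [not_not] at hne
      by_cases heq : lb.getD j 0 = rb
      · rw [if_pos heq, heq, hne]
      · rw [if_neg heq]
  have hlbU_len :
      (if ra ≠ rb then lb.map (fun x => if x = rb then ra else x) else lb).length = n := by
    by_cases hne : ra ≠ rb
    · rw [if_pos hne, List.length_map]; exact hlbl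
    · rw [if_neg hne]; exact hlbl
  -- pvPsl for the updated parent list
  have hPslU : pvPsl n (k+1) (sl2.set rb ra) := by
    intro j hj
    have hgd : (sl2.set rb ra).getD j 0 = if j = rb then ra else sl2.getD j 0 := by
      by_cases hjr : j = rb
      · rw [if_pos hjr, hjr]; exact getD_set_self hrb_len
      · rw [if_neg hjr]; exact getD_set_ne hjr
    constructor
    · intro hjk
      rw [hgd]
      by_cases hjr : j = rb
      · rw [if_pos hjr]; omega
      · rw [if_neg hjr]
        rcases Nat.lt_or_ge j (2*k) with hlt | hge
        · have := (hb_Psl j hj).1 hlt; omega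
        · have := (hb_Psl j hj).2 hge; omega
    · intro hjk
      rw [hgd, if_neg (by omega : ¬ j = rb)]
      exact (hb_Psl j hj).2 (by omega)
  have hclU : ∀ j, j < (sl2.set rb ra).length → (sl2.set rb ra).getD j 0 < (sl2.set rb ra).length :=
    pvPsl_cl (by omega) hslU_len hPslU
  -- fuel invariant for the merged state
  have hfuelU : ∀ j, j < n → findPure n (sl2.set rb ra) j =
      some (if lb.getD j 0 = rb then ra else lb.getD j 0) := by
    intro j hj
    have h1 := findPure_set_union hfix_ra hfix_rb hrb_len n j (lb.getD j 0) (hb_fuel j hj)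
    have h2 := findPure_fuel (by omega) hclU h1
    rw [hslU_len] at h2
    exact h2
  -- pvPsl for the updated label array
  have hPlbU : pvPsl n (k+1)
      (if ra ≠ rb then lb.map (fun x => if x = rb then ra else x) else lb) := by
    intro j hj
    rw [hlbU j hj]
    constructor
    · intro hjk
      by_cases heq : lb.getD j 0 = rb
      · rw [if_pos heq]; omega
      · rw [if_neg heq]
        rcases Nat.lt_or_ge j (2*k) with hlt | hge
        · have := (hPlb j hj).1 hlt; omega
        · have := (hPlb j hj).2 hge; omega
    · intro hjk
      have hje : lb.getD j 0 = j := (hPlb j hj).2 (by omega)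
      rw [hje, if_neg (by omega : ¬ j = rb)]
  refine ⟨hb_h, ⟨hslU_len, hlbU_len, hPslU, hPlbU, ?_⟩, ?_⟩
  · intro j hj
    rw [hlbU j hj]
    exact hfuelU j hj
  · intro s' v hv
    have := hb_hb s' v hv
    omega


theorem pvLoop_sim {n : Nat} : ∀ (ps : List (String × String)) (k : Nat)
    (sl lb : List Nat) (h : PySem.Dict String Nat),
    2*(k + ps.length) ≤ n → pvInv n k sl lb → pvHInv k h →
    pvInv n (k + ps.length) (pvLoopA ps k sl h).1 (pvLoopB ps k lb h).1 := by
  intro ps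
  induction ps with
  | nil =>
    intro k sl lb h hk hinv hh
    simpa [pvLoopA, pvLoopB] using hinv
  | cons p rest ih =>
    intro k sl lb h hk hinv hh
    simp only [List.length_cons] at hk
    obtain ⟨heq, hinv', hh'⟩ := pvStep_sim p.1 p.2 (by omega) hinv hh
    simp only [pvLoopA, pvLoopB]
    rw [← heq]
    have hres := ih (k+1) (pvStepA sl h k p.1 p.2).1 (pvStepB lb h k p.1 p.2).1
      (pvStepA sl h k p.1 p.2).2 (by omega) hinv' hh'
    have harith : k + (p :: rest).length = k + 1 + rest.length := by
      simp only [List.length_cons]; omega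
    rw [harith]
    exact hres


theorem pvCompress_spec {n : Nat} {lb : List Nat} (hlbl : lb.length = n)
    (hlb : ∀ j, j < n → lb.getD j 0 < n) :
    ∀ (idxs : List Nat) (sl : List Nat), sl.length = n →
    (∀ j, j < n → sl.getD j 0 < n) →
    (∀ j, j < n → findPure n sl j = some (lb.getD j 0)) →
    (∀ i, i ∈ idxs → i < n) →
    (pvCompress idxs sl).length = n ∧
    (∀ j, j < n → sl.getD j 0 = lb.getD j 0 → (pvCompress idxs sl).getD j 0 = lb.getD j 0) ∧
    (∀ i, i ∈ idxs → (pvCompress idxs sl).getD i 0 = lb.getD i 0) := by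
  intro idxs
  induction idxs with
  | nil =>
    intro sl hslen hcl hfuel hmem
    exact ⟨hslen, fun j hj hh => hh, fun i hi => absurd hi (List.not_mem_nil)⟩
  | cons i rest ih =>
    intro sl hslen hcl hfuel hmem
    have hin : i < n := hmem i List.mem_cons_self
    -- the step: find the root of sl[i], compress, then write lb[i] at i
    have hslin : sl.getD i 0 < n := hcl i hin
    have hfv : findPure sl.length sl (sl.getD i 0) = some (lb.getD (sl.getD i 0) 0) := by
      rw [hslen]; exact hfuel _ hslin
    have hcl' : ∀ j, j < sl.length → sl.getD j 0 < sl.length := by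
      intro j hj; rw [hslen] at hj ⊢; exact hcl j hj
    obtain ⟨hr2, hlen2, hpres2, hwr2⟩ := pvFindRoot_spec (by omega) hcl' hfv
    -- root of sl[i] = root of i = lb[i]
    have hroot_eq : lb.getD (sl.getD i 0) 0 = lb.getD i 0 := by
      have hfi := hfuel i hin
      by_cases hfx : sl.getD i 0 = i
      · rw [hfx]
      · have hn1 : ∃ m, n = m + 1 := ⟨n - 1, by omega⟩
        obtain ⟨m, rfl⟩ := hn1
        rw [findPure_succ, if_neg hfx] at hfi
        exact findPure_det (hfuel _ hslin) (findPure_mono (g := m+1) hfi (by omega))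
    set q := pvFindRoot sl.length sl (sl.getD i 0) with hq
    have hstep : pvCompress (i :: rest) sl = pvCompress rest (q.1.set i q.2) := rfl
    have hq2 : q.2 = lb.getD i 0 := by rw [hr2, hroot_eq]
    have hilen : i < q.1.length := by omega
    -- facts about the new list s' = q.1.set i q.2
    have hs'_len : (q.1.set i q.2).length = n := by rw [List.length_set]; omega
    have hs'_getD : ∀ j, (q.1.set i q.2).getD j 0 = if j = i then q.2 else q.1.getD j 0 := by
      intro j
      by_cases hji : j = i
      · rw [if_pos hji, hji]; exact getD_set_self hilen
      · rw [if_neg hji]; exact getD_set_ne hji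
    have hwr : ∀ j, j < n → (q.1.set i q.2).getD j 0 = sl.getD j 0 ∨
        (q.1.set i q.2).getD j 0 = lb.getD j 0 := by
      intro j hj
      rw [hs'_getD j]
      by_cases hji : j = i
      · rw [if_pos hji, hq2, hji]; right; rfl
      · rw [if_neg hji]
        rcases hwr2 j with heq | ⟨g, hg⟩
        · left; exact heq
        · right; exact findPure_det hg (hfuel j hj)
    have hs'_cl : ∀ j, j < n → (q.1.set i q.2).getD j 0 < n := by
      intro j hj
      rcases hwr j hj with heq | heq
      · rw [heq]; exact hcl j hj
      · rw [heq]; exact hlb j hj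
    have hs'_fuel : ∀ j, j < n → findPure n (q.1.set i q.2) j = some (lb.getD j 0) := by
      intro j hj
      have h1 := hpres2 _ _ _ (hfuel j hj)
      have hq2' : findPure n q.1 i = some q.2 := by
        rw [hq2]; exact hpres2 _ _ _ (hfuel i hin)
      exact findPure_set_root hilen hq2' _ _ _ h1
    obtain ⟨ih_len, ih_keep, ih_done⟩ := ih (q.1.set i q.2) hs'_len hs'_cl hs'_fuel
      (fun x hx => hmem x (List.mem_cons_of_mem _ hx))
    rw [hstep]
    refine ⟨ih_len, ?_, ?_⟩
    · intro j hj hjeq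
      apply ih_keep j hj
      rcases hwr j hj with heq | heq
      · rw [heq]; exact hjeq
      · exact heq
    · intro x hx
      rcases List.mem_cons.mp hx with hxi | hxr
      · subst hxi
        apply ih_keep x hin
        rw [hs'_getD, if_pos rfl, hq2]
      · exact ih_done x hxr


theorem pvGroupStep_eq (r : PySem.Dict Nat (List Nat)) (k i : Nat) :
    (match r.get? k with
     | some v => r.insert k (v ++ [i])
     | none => r.insert k [i]) = r.insert k (r.getD k [] ++ [i]) := by
  cases hg : r.get? k with
  | none =>
    have hd : r.getD k [] = [] := by
      show (r.get? k).getD [] = []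
      rw [hg]; rfl
    rw [hd]
    rfl
  | some v =>
    have hd : r.getD k [] = v := by
      show (r.get? k).getD [] = v
      rw [hg]; rfl
    rw [hd]


theorem pvBuckets_foldl (L : List Nat) : ∀ (m s : Nat) (g : PySem.Dict Nat (List Nat)),
    m = L.length - s →
    pvBucketsB (L.drop s) s g = (List.range' s m).foldl (fun r i =>
      let k := L.getD i 0
      match r.get? k with
      | some v => r.insert k (v ++ [i])
      | none => r.insert k [i]) g := by
  intro m
  induction m with
  | zero =>
    intro s g hm
    have : L.drop s = [] := List.drop_eq_nil_of_le (by omega)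
    rw [this]
    rfl
  | succ m ih =>
    intro s g hm
    have hs : s < L.length := by omega
    rw [List.drop_eq_getElem_cons hs, List.range'_succ]
    simp only [pvBucketsB, List.foldl_cons]
    rw [ih (s+1) _ (by omega)]
    have hkey : L.getD s 0 = L[s] := List.getD_eq_getElem _ _ hs
    congr 1
    rw [pvGroupStep_eq, hkey]


theorem pvGroup_eq (L : List Nat) : pvGroupA L = pvBucketsB L 0 PySem.Dict.empty := by
  have := pvBuckets_foldl L L.length 0 PySem.Dict.empty (by omega)
  rw [List.drop_zero] at this
  rw [this, pvGroupA, List.range_eq_range']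


theorem getD_range {n j : Nat} (h : j < n) : (List.range n).getD j 0 = j := by
  rw [List.getD_eq_getElem _ _ (by simpa using h)]
  simp


theorem main_eq (data : List String × List String × List Int) :
    get_same_meaning_sentence data = get_same_meaning_sentence_alt data := by
  unfold get_same_meaning_sentence get_same_meaning_sentence_alt
  set pairs := pvPairs data with hpairs
  set n := 2 * pairs.length with hn
  show (pvGroupA (pvCompress
      (List.range (pvLoopA pairs 0 (List.range n) PySem.Dict.empty).1.length)
      (pvLoopA pairs 0 (List.range n) PySem.Dict.empty).1)).items.map
        (fun kv => kv.2.map (pvSent pairs)) =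
    (pvBucketsB (pvLoopB pairs 0 (List.range n) PySem.Dict.empty).1 0
      PySem.Dict.empty).values.map (fun v => v.map (pvSent pairs))
  -- initial invariant
  have hinv0 : pvInv n 0 (List.range n) (List.range n) := by
    refine ⟨List.length_range, List.length_range, ?_, ?_, ?_⟩
    · intro j hj
      exact ⟨fun h => by omega, fun _ => getD_range hj⟩
    · intro j hj
      exact ⟨fun h => by omega, fun _ => getD_range hj⟩
    · intro j hj
      rw [getD_range hj]
      exact findPure_fix (getD_range hj) (by omega)
  have hh0 : pvHInv 0 (PySem.Dict.empty : PySem.Dict String Nat) := by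
    intro s v hv
    rw [PySem.Dict.get?_empty] at hv
    cases hv
  have hloop := pvLoop_sim pairs 0 (List.range n) (List.range n) PySem.Dict.empty
    (by omega) hinv0 hh0
  rw [Nat.zero_add] at hloop
  set slA := (pvLoopA pairs 0 (List.range n) PySem.Dict.empty).1 with hslA
  set lbB := (pvLoopB pairs 0 (List.range n) PySem.Dict.empty).1 with hlbB
  obtain ⟨hsl_len, hlb_len, hPsl, hPlb, hfuel⟩ := hloop
  have hkn : 2 * pairs.length = n := rfl
  have hlb_lt : ∀ j, j < n → lbB.getD j 0 < n := by
    intro j hj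
    have := (hPlb j hj).1 (by omega)
    omega
  have hsl_lt : ∀ j, j < n → slA.getD j 0 < n := by
    intro j hj
    have := (hPsl j hj).1 (by omega)
    omega
  obtain ⟨hC_len, hC_keep, hC_done⟩ := pvCompress_spec hlb_len hlb_lt
    (List.range slA.length) slA hsl_len hsl_lt hfuel
    (fun i hi => by rw [← hsl_len]; exact List.mem_range.mp hi)
  have hext : pvCompress (List.range slA.length) slA = lbB := by
    apply List.ext_getElem (by omega)
    intro i h1 h2
    have hiN : i < n := by omega
    have := hC_done i (List.mem_range.mpr (by omega))
    rw [List.getD_eq_getElem _ _ h1, List.getD_eq_getElem _ _ h2] at this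
    exact this
  rw [hext, pvGroup_eq]
  show (pvBucketsB lbB 0 PySem.Dict.empty).items.map (fun kv => kv.2.map (pvSent pairs)) =
    ((pvBucketsB lbB 0 PySem.Dict.empty).items.map (·.2)).map (fun v => v.map (pvSent pairs))
  rw [List.map_map]
  rfl


-- ===== VERDICT (by name: the statement is the Claim_ definition above) =====
theorem get_same_meaning_sentence_spec : Claim_equal_get_same_meaning_sentence := by
  intro data _hdom
  show get_same_meaning_sentence data = get_same_meaning_sentence_alt data
  exact main_eq data
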